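-- pv_equiv track=rewrite | github.com/KirstenD/ConnectWithFriends | src/backEnd/games/models.py | _check_winner_in_sequence
-- ===== SOURCE A (Python) =====
-- def _check_winner_in_sequence(sequence):
--     """
--     Determine if there is a sequence of 4 tokens from the same player in a
--     list.
--     """
--     current_streak = 0
--     current_player = None
--     for token in sequence:
--         if token is not None and token == current_player:
--             current_streak += 1
--             if current_streak >= 4:
--                 return current_player
--         else:
--             current_streak = 1
--             current_player = token
-- ===== SOURCE B (Python) =====
-- def _check_winner_in_sequence(sequence):
--     """Stateless sliding-window check: test every window of 4 consecutive
--     tokens, built by zipping shifted copies of the sequence."""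
--     for a, b, c, d in zip(sequence, sequence[1:], sequence[2:], sequence[3:]):
--         if a is not None and a == b == c == d:
--             return a
--     return None
-- ===== Notes on version B (the rewrite author's own statement) =====
-- stated objective: simpler
-- what changed: Replaces A's stateful streak-counter scan by a stateless sliding-window check: zip four shifted copies of the list and return the first all-equal non-None window of 4.
import Mathlib
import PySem

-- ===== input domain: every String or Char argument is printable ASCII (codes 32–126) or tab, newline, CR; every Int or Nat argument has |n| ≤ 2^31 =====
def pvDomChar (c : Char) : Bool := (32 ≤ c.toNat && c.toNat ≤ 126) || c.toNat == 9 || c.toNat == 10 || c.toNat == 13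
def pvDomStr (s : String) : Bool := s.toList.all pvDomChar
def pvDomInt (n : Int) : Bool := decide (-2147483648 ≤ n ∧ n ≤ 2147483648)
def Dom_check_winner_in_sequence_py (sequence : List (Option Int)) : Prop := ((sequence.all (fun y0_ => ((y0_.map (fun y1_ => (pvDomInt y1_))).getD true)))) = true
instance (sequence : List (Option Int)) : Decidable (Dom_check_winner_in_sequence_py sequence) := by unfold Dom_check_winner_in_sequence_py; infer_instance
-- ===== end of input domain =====

-- B replaces A's stateful streak-counter scan by a stateless sliding-window check over zipped shifted copies; same O(n) cost, simpler shape.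
-- ===== PORT A =====
-- literal port of A's loop: state = (streak, player); returning `player` mirrors `return current_player`.
def pvLoopA : List (Option Int) → Int → Option Int → Option Int
  | [], _, _ => none
  | token :: rest, streak, player =>
    if token ≠ none ∧ token = player then
      (if streak + 1 ≥ 4 then player else pvLoopA rest (streak + 1) player)
    else pvLoopA rest 1 token

def check_winner_in_sequence_py (sequence : List (Option Int)) : Option Int :=
  pvLoopA sequence 0 none

-- ===== PORT B =====
-- the loop body over the zipped quadruples: first non-None all-equal window wins
def pvFindWin : List (Option Int × Option Int × Option Int × Option Int) → Option Int
  | [] => none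
  | (a, b, c, d) :: rest => if a ≠ none ∧ a = b ∧ b = c ∧ c = d then a else pvFindWin rest

-- zip(sequence, sequence[1:], sequence[2:], sequence[3:]) as nested List.zip, then the loop
def check_winner_in_sequence_py_alt (sequence : List (Option Int)) : Option Int :=
  pvFindWin (sequence.zip ((sequence.drop 1).zip ((sequence.drop 2).zip (sequence.drop 3))))

-- ===== PRECONDITION & SPEC =====
def Spec_check_winner_in_sequence_py (sequence : List (Option Int)) (out : Option Int) : Prop := out = check_winner_in_sequence_py_alt sequence
instance (sequence : List (Option Int)) (out : Option Int) : Decidable (Spec_check_winner_in_sequence_py sequence out) := by unfold Spec_check_winner_in_sequence_py; infer_instance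

-- ===== CLAIM (what is proved, stated in full; the proofs are below) =====
def Claim_equal_check_winner_in_sequence_py : Prop := ∀ (sequence : List (Option Int)), Dom_check_winner_in_sequence_py sequence → Spec_check_winner_in_sequence_py sequence (check_winner_in_sequence_py sequence)

-- ===== LEMMAS AND PROOFS =====

-- B's result steps one element at a time: the head window either fires or is skipped
lemma pv_alt_cons (x : Option Int) (l : List (Option Int)) :
    check_winner_in_sequence_py_alt (x :: l) =
      if x ≠ none ∧ l.take 3 = [x, x, x] then x else check_winner_in_sequence_py_alt l := by
  rcases l with _ | ⟨b, _ | ⟨c, _ | ⟨d, r⟩⟩⟩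
  · simp [check_winner_in_sequence_py_alt, pvFindWin]
  · simp [check_winner_in_sequence_py_alt, pvFindWin]
  · simp [check_winner_in_sequence_py_alt, pvFindWin]
  · show pvFindWin ((x, b, c, d) :: _) = _
    rw [pvFindWin]
    have hiff : (x ≠ none ∧ x = b ∧ b = c ∧ c = d) ↔ (x ≠ none ∧ (b :: c :: d :: r).take 3 = [x, x, x]) := by
      constructor
      · rintro ⟨h, rfl, rfl, rfl⟩; exact ⟨h, by simp⟩
      · rintro ⟨h, ht⟩; simp [List.take] at ht; obtain ⟨rfl, rfl, rfl⟩ := ht; exact ⟨h, rfl, rfl, rfl⟩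
    rw [if_congr hiff rfl rfl]
    rfl

-- a head that cannot start a winning window is skipped; in particular a none head
lemma pv_alt_skip (x : Option Int) (l : List (Option Int))
    (h : ¬ (x ≠ none ∧ l.take 3 = [x, x, x])) :
    check_winner_in_sequence_py_alt (x :: l) = check_winner_in_sequence_py_alt l := by
  rw [pv_alt_cons, if_neg h]

-- a prefix of at most 3 copies of t followed by x with (t = none ∨ x ≠ t) never wins
lemma pv_alt_prefix (k : Nat) (t x : Option Int) (xs : List (Option Int))
    (hk : k ≤ 3) (h : t = none ∨ x ≠ t) :
    check_winner_in_sequence_py_alt (List.replicate k t ++ x :: xs) =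
      check_winner_in_sequence_py_alt (x :: xs) := by
  induction k with
  | zero => simp
  | succ n ih =>
    have hn : n ≤ 3 := by omega
    have ihn := ih hn
    rw [List.replicate_succ, List.cons_append, pv_alt_skip, ihn]
    rintro ⟨ht, htake⟩
    rcases h with rfl | hxt
    · exact ht rfl
    · -- t ≠ none and x ≠ t: take 3 of (replicate n t ++ x :: xs) contains x since n ≤ 2
      interval_cases n <;> simp_all [List.take]

lemma pv_alt_replicate_none (k : Nat) (xs : List (Option Int)) :
    check_winner_in_sequence_py_alt (List.replicate k (none : Option Int) ++ xs) =
      check_winner_in_sequence_py_alt xs := by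
  induction k with
  | zero => simp
  | succ n ih =>
    rw [List.replicate_succ, List.cons_append, pv_alt_skip, ih]
    rintro ⟨h, -⟩; exact h rfl

-- the loop invariant: streak k with player t means the last k tokens were t
lemma pv_loopA_eq (l : List (Option Int)) : ∀ (t : Option Int) (k : Nat), 1 ≤ k → k ≤ 3 →
    pvLoopA l (k : Int) t = check_winner_in_sequence_py_alt (List.replicate k t ++ l) := by
  induction l with
  | nil =>
    intro t k h1 h3
    have h : check_winner_in_sequence_py_alt (List.replicate k t ++ []) = none := by
      interval_cases k <;> simp [check_winner_in_sequence_py_alt, pvFindWin]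
    rw [List.append_nil] at h
    simp [pvLoopA, h]
  | cons x xs ih =>
    intro t k h1 h3
    by_cases hc : x ≠ none ∧ x = t
    · obtain ⟨hx, rfl⟩ := hc
      have hstep : pvLoopA (x :: xs) (k : Int) x =
          if x ≠ none ∧ x = x then (if (k : Int) + 1 ≥ 4 then x else pvLoopA xs ((k : Int) + 1) x)
          else pvLoopA xs 1 x := rfl
      rw [hstep, if_pos ⟨hx, rfl⟩]
      have hlist : List.replicate k x ++ x :: xs = List.replicate (k + 1) x ++ xs := by
        rw [List.replicate_succ']; simp
      by_cases h4 : (k : Int) + 1 ≥ 4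
      · have hk3 : k = 3 := by omega
        subst hk3
        rw [if_pos h4, hlist]
        simp [check_winner_in_sequence_py_alt, List.replicate, pvFindWin, hx]
      · have hk : k + 1 ≤ 3 := by omega
        have : ((k : Int) + 1) = ((k + 1 : Nat) : Int) := by push_cast; ring
        rw [if_neg h4, this, ih x (k + 1) (by omega) hk, hlist]
    · have hstep : pvLoopA (x :: xs) (k : Int) t =
          if x ≠ none ∧ x = t then (if (k : Int) + 1 ≥ 4 then t else pvLoopA xs ((k : Int) + 1) t)
          else pvLoopA xs 1 x := rfl
      rw [hstep, if_neg hc]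
      have h1' : pvLoopA xs (1 : Int) x = pvLoopA xs ((1 : Nat) : Int) x := by norm_num
      rw [h1', ih x 1 le_rfl (by omega)]
      by_cases hxt : x = t
      · subst hxt
        have hxn : x = none := by by_contra hn; exact hc ⟨hn, rfl⟩
        subst hxn
        have h2 : List.replicate k (none : Option Int) ++ none :: xs =
            List.replicate (k + 1) (none : Option Int) ++ xs := by
          rw [List.replicate_succ']; simp
        rw [h2, pv_alt_replicate_none, pv_alt_replicate_none]
      · rw [pv_alt_prefix k t x xs h3 (Or.inr hxt)]
        simp [List.replicate]

-- ===== VERDICT (by name: the statement is the Claim_ definition above) =====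
theorem check_winner_in_sequence_py_spec : Claim_equal_check_winner_in_sequence_py := by
  intro sequence _
  unfold Spec_check_winner_in_sequence_py check_winner_in_sequence_py
  cases sequence with
  | nil => simp [pvLoopA, check_winner_in_sequence_py_alt, pvFindWin]
  | cons t l =>
    have hstep : pvLoopA (t :: l) 0 none = pvLoopA l 1 t := by
      have : ¬ (t ≠ none ∧ t = none) := by rintro ⟨h, h2⟩; exact h h2
      simp [pvLoopA, this]
    have h1 : pvLoopA l (1 : Int) t = pvLoopA l ((1 : Nat) : Int) t := by norm_num
    rw [hstep, h1, pv_loopA_eq l t 1 le_rfl (by omega)]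
    simp [List.replicate]
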